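-- pv_equiv track=rewrite | github.com/ITLBologna/Fluxus-AI | front_end/side_bar.py | check_ts
-- ===== SOURCE A (Python) =====
-- def check_ts(ts):
--     ts = ts.split(':')
--     if len(ts) != 3:
--         return False
--
--     for component in ts:
--         if len(component) != 2:
--             return False
--
--     return True
-- ===== SOURCE B (Python) =====
-- def check_ts(ts):
--     return len(ts) == 8 and ts[2] == ':' and ts[5] == ':' and ts.count(':') == 2
-- ===== Notes on version B (the rewrite author's own statement) =====
-- stated objective: simpler
-- what changed: Replaces the split-on-colon list construction plus a per-component length loop by a single closed-form positional check (length 8, colons exactly at positions 2 and 5, colon count 2).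
import Mathlib
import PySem

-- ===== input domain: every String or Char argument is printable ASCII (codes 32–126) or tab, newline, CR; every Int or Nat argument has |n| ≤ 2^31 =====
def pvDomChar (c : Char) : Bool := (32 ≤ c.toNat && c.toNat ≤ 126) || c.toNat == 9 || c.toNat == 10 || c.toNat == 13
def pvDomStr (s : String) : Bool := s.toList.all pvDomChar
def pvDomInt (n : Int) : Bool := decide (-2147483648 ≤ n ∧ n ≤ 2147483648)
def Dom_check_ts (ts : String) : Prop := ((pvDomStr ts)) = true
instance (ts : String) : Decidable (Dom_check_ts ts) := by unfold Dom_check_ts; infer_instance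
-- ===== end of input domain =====

-- B replaces A's split-on-colon plus per-component length loop by a closed-form positional check of the fixed HH:MM:SS layout (objective: simpler).

-- ===== PORT A =====
-- the 'for component in ts: if len(component) != 2: return False' loop
def checkComponents : List (List Char) → Bool
  | [] => true
  | component :: rest => if component.length ≠ 2 then false else checkComponents rest

def check_ts (ts : String) : Bool :=
  -- ts.split(':'): the separator ":" is nonempty, so Python never raises; PySem.Chars.splitOn is the sep ≠ "" form of split
  let parts := PySem.Chars.splitOn ts.toList [':']
  if parts.length ≠ 3 then false
  else checkComponents parts

-- ===== PORT B =====
def check_ts_alt (ts : String) : Bool :=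
  let l := ts.toList
  (l.length == 8) && (PySem.Chars.pyGet? l 2 == some ':') && (PySem.Chars.pyGet? l 5 == some ':')
    && (PySem.Chars.count l [':'] == 2)

-- ===== PRECONDITION & SPEC =====
def Spec_check_ts (ts : String) (out : Bool) : Prop := out = check_ts_alt ts
instance (ts : String) (out : Bool) : Decidable (Spec_check_ts ts out) := by unfold Spec_check_ts; infer_instance

-- ===== CLAIM (what is proved, stated in full; the proofs are below) =====
def Claim_equal_check_ts : Prop := ∀ (ts : String), Dom_check_ts ts → Spec_check_ts ts (check_ts ts)

-- ===== LEMMAS AND PROOFS =====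

-- accumulator-free model of splitting on ':'
def splitColon : List Char → List Char → List (List Char)
  | cur, [] => [cur.reverse]
  | cur, c :: rest => if c = ':' then cur.reverse :: splitColon [] rest else splitColon (c :: cur) rest

def joinColon : List (List Char) → List Char
  | [] => []
  | [p] => p
  | p :: ps => p ++ ':' :: joinColon ps

theorem splitOn_go_colon (fuel : Nat) : ∀ (l cur : List Char) (acc : List (List Char)),
    l.length < fuel →
    PySem.Chars.splitOn.go [':'] fuel l cur acc = acc.reverse ++ splitColon cur l := by
  induction fuel with
  | zero => intro l cur acc h; omega
  | succ n ih =>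
    intro l cur acc h
    cases l with
    | nil => simp [PySem.Chars.splitOn.go, splitColon]
    | cons c rest =>
      by_cases hc : c = ':'
      · subst hc
        simp only [PySem.Chars.splitOn.go, List.isPrefixOf, BEq.rfl, Bool.true_and,
          List.isPrefixOf_nil_left, if_pos]
        simp only [List.length_singleton, List.drop_succ_cons, List.drop_zero]
        rw [ih rest [] (cur.reverse :: acc) (by simpa using Nat.lt_of_succ_lt_succ h)]
        simp [splitColon]
      · simp only [PySem.Chars.splitOn.go, List.isPrefixOf]
        rw [if_neg (by simp [hc]; exact fun h' => (hc h'.symm).elim)]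
        rw [ih rest (c :: cur) acc (by simpa using Nat.lt_of_succ_lt_succ h)]
        simp [splitColon, hc]

theorem splitOn_colon (l : List Char) :
    PySem.Chars.splitOn l [':'] = splitColon [] l := by
  unfold PySem.Chars.splitOn
  rw [splitOn_go_colon (l.length + 1) l [] [] (by omega)]
  simp

theorem count_go_colon (fuel : Nat) : ∀ (l : List Char) (acc : Nat),
    l.length ≤ fuel →
    PySem.Chars.count.go [':'] fuel l acc = acc + l.count ':' := by
  induction fuel with
  | zero =>
    intro l acc h
    cases l with
    | nil => simp [PySem.Chars.count.go]
    | cons c rest => simp at h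
  | succ n ih =>
    intro l acc h
    cases l with
    | nil => simp [PySem.Chars.count.go]
    | cons c rest =>
      by_cases hc : c = ':'
      · subst hc
        simp only [PySem.Chars.count.go, List.isPrefixOf, BEq.rfl, Bool.true_and,
          List.isPrefixOf_nil_left, if_pos]
        simp only [List.length_singleton, List.drop_succ_cons, List.drop_zero]
        rw [ih rest (acc + 1) (by simpa using Nat.le_of_succ_le_succ h)]
        simp [List.count_cons]; omega
      · simp only [PySem.Chars.count.go, List.isPrefixOf]
        rw [if_neg (by simp; exact fun h' => (hc h'.symm).elim)]
        rw [ih rest acc (by simpa using Nat.le_of_succ_le_succ h)]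
        simp [List.count_cons, hc]

theorem count_colon (l : List Char) : PySem.Chars.count l [':'] = l.count ':' := by
  unfold PySem.Chars.count
  simp [count_go_colon l.length l 0 (le_refl _)]

theorem splitColon_ne_nil (l cur : List Char) : splitColon cur l ≠ [] := by
  induction l generalizing cur with
  | nil => simp [splitColon]
  | cons c rest ih =>
    simp only [splitColon]
    split
    · simp
    · exact ih _

theorem splitColon_join (l : List Char) : ∀ cur, joinColon (splitColon cur l) = cur.reverse ++ l := by
  induction l with
  | nil => intro cur; simp [splitColon, joinColon]
  | cons c rest ih =>
    intro cur
    by_cases hc : c = ':'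
    · subst hc
      simp only [splitColon, if_pos rfl, if_true]
      obtain ⟨p, ps, hps⟩ := List.exists_cons_of_ne_nil (splitColon_ne_nil rest [])
      have hrest := ih ([] : List Char)
      rw [hps] at hrest ⊢
      simp only [List.reverse_nil, List.nil_append] at hrest
      rw [show joinColon (cur.reverse :: p :: ps) = cur.reverse ++ ':' :: joinColon (p :: ps) from rfl,
        hrest]
    · simp only [splitColon, if_neg hc]
      rw [ih (c :: cur)]
      simp
theorem splitColon_nocolon (l : List Char) : ∀ cur, ':' ∉ cur →
    ∀ p ∈ splitColon cur l, ':' ∉ p := by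
  induction l with
  | nil =>
    intro cur hcur p hp
    simp only [splitColon, List.mem_singleton] at hp
    subst hp; simpa using hcur
  | cons c rest ih =>
    intro cur hcur p hp
    by_cases hc : c = ':'
    · subst hc
      simp only [splitColon, if_true, List.mem_cons] at hp
      rcases hp with hp | hp
      · subst hp; simpa using hcur
      · exact ih [] (by simp) p hp
    · simp only [splitColon, if_neg hc] at hp
      exact ih (c :: cur) (by simp [hcur]; exact fun h => hc h.symm) p hp

theorem key (l : List Char) :
    (if (splitColon [] l).length ≠ 3 then false else checkComponents (splitColon [] l))
    = ((l.length == 8) && (PySem.List.pyGet? l 2 == some ':') && (PySem.List.pyGet? l 5 == some ':')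
        && (l.count ':' == 2)) := by
  rw [Bool.eq_iff_iff]
  constructor
  · intro hA
    split at hA
    · exact absurd hA (by simp)
    · rename_i hlen3
      simp only [ne_eq, not_not] at hlen3
      obtain ⟨p, q, r, hpqr⟩ := List.length_eq_three.mp hlen3
      rw [hpqr] at hA
      simp only [checkComponents] at hA
      split at hA
      · exact absurd hA (by simp)
      · split at hA
        · exact absurd hA (by simp)
        · split at hA
          · exact absurd hA (by simp)
          · rename_i hp2 hq2 hr2
            simp only [ne_eq, not_not] at hp2 hq2 hr2
            obtain ⟨a, b, hab⟩ := List.length_eq_two.mp hp2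
            obtain ⟨c, d, hcd⟩ := List.length_eq_two.mp hq2
            obtain ⟨e, f, hef⟩ := List.length_eq_two.mp hr2
            have hjoin := splitColon_join l []
            rw [hpqr, hab, hcd, hef] at hjoin
            simp only [joinColon, List.reverse_nil, List.nil_append] at hjoin
            have hnc := splitColon_nocolon l [] (by simp)
            rw [hpqr] at hnc
            have hna : ':' ∉ [a, b] := hnc _ (by simp [hab])
            have hnc' : ':' ∉ [c, d] := hnc _ (by simp [hcd])
            have hne : ':' ∉ [e, f] := hnc _ (by simp [hef])
            simp only [List.mem_cons, List.not_mem_nil, or_false, not_or] at hna hnc' hne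
            rw [← hjoin]
            simp [PySem.List.pyGet?, PySem.List.pyIdx?, List.count_cons,
              Ne.symm hna.1, Ne.symm hna.2, Ne.symm hnc'.1, Ne.symm hnc'.2,
              Ne.symm hne.1, Ne.symm hne.2]
  · intro hB
    simp only [Bool.and_eq_true, beq_iff_eq] at hB
    obtain ⟨⟨⟨hlen, h2⟩, h5⟩, hcount⟩ := hB
    match l, hlen with
    | [a, b, c, d, e, f, g, h], _ =>
      simp [PySem.List.pyGet?, PySem.List.pyIdx?] at h2 h5
      subst h2; subst h5
      simp only [List.count_cons, List.count_nil] at hcount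
      have ha : a ≠ ':' ∧ b ≠ ':' ∧ d ≠ ':' ∧ e ≠ ':' ∧ g ≠ ':' ∧ h ≠ ':' := by
        by_cases h1 : a = ':' <;> by_cases hb : b = ':' <;> by_cases hd : d = ':' <;>
          by_cases he : e = ':' <;> by_cases hg : g = ':' <;> by_cases hh : h = ':' <;>
          simp [h1, hb, hd, he, hg, hh] at hcount ⊢
      obtain ⟨h1, hb, hd, he, hg, hh⟩ := ha
      simp [splitColon, h1, hb, hd, he, hg, hh, checkComponents]

-- ===== VERDICT (by name: the statement is the Claim_ definition above) =====
theorem check_ts_spec : Claim_equal_check_ts := by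
  intro ts _
  unfold Spec_check_ts check_ts check_ts_alt
  simp only [splitOn_colon, count_colon, PySem.Chars.pyGet?_eq_listPyGet?]
  exact key ts.toList
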